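-- pv_equiv track=rewrite | github.com/eddierichter-amd/minions | apps/minions-story-teller/utils.py | enhance_image_prompt
-- ===== SOURCE A (Python) =====
-- def enhance_image_prompt(chapter_content: str, chapter_title: str, story_theme: str) -> str:
--     """
--     Create an enhanced image prompt based on chapter content and story theme.
--
--     Args:
--         chapter_content: The text content of the chapter
--         chapter_title: The title of the chapter
--         story_theme: The overall theme/idea of the story
--
--     Returns:
--         Enhanced image prompt suitable for FLUX.1-schnell
--     """
--     # Analyze chapter content for specific visual elements
--     content_lower = chapter_content.lower()
--
--     # Start with base prompt
--     prompt_parts = ["Children's book illustration"]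
--
--     # Identify main character (Whiskers the cat)
--     main_character = "orange tabby cat"
--     if 'whiskers' in content_lower:
--         prompt_parts.append(f"featuring {main_character}")
--
--     # Determine scene based on chapter content
--     scene_description = ""
--
--     # Chapter 1 scenes - Morning, window, neighborhood
--     if any(word in content_lower for word in ['woke up', 'morning', 'window', 'stretched', 'yawned']):
--         scene_description = "waking up in a cozy bedroom, stretching and looking out a sunny window"
--     elif any(word in content_lower for word in ['neighborhood', 'decorations', 'flags', 'outside']):
--         scene_description = "looking out window at a neighborhood decorated with colorful American flags and patriotic bunting"
--     elif any(word in content_lower for word in ['bella', 'rabbit', 'hopping', 'street']):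
--         scene_description = "meeting a friendly white rabbit on a sunny street with red, white and blue decorations"
--
--     # Chapter 2 scenes - Planning, backyard, friends
--     elif any(word in content_lower for word in ['planning', 'backyard', 'basket', 'decorations']):
--         scene_description = "in a sunny backyard with colorful balloons and picnic tables, planning a party"
--     elif any(word in content_lower for word in ['friends', 'gathering', 'max', 'dog']):
--         scene_description = "gathered with animal friends including a wise old dog and playful rabbit in a backyard"
--     elif any(word in content_lower for word in ['craft', 'making', 'hats', 'flags']):
--         scene_description = "doing arts and crafts, making patriotic hats and decorations with friends"
--
--     # Chapter 3 scenes - Celebration, sparklers, fireworks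
--     elif any(word in content_lower for word in ['sparkler', 'parade', 'lighting', 'twinkling']):
--         scene_description = "holding sparklers that create magical twinkling lights in the evening"
--     elif any(word in content_lower for word in ['fireworks', 'sky', 'night', 'burst']):
--         scene_description = "watching colorful fireworks bursting in the dark night sky"
--     elif any(word in content_lower for word in ['celebration', 'party', 'dancing', 'music']):
--         scene_description = "celebrating at a joyful outdoor party with music and dancing"
--
--     # Story time scenes
--     elif any(word in content_lower for word in ['story', 'listening', 'tree', 'gathered']):
--         scene_description = "sitting in a circle with friends under a shady tree listening to stories"
--
--     # Playing/games scenes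
--     elif any(word in content_lower for word in ['playing', 'tag', 'games', 'running']):
--         scene_description = "playing tag and games with friends in a colorful backyard"
--
--     # Default scene
--     else:
--         scene_description = "in a cheerful outdoor setting with patriotic decorations"
--
--     # Add the scene description
--     if scene_description:
--         prompt_parts.append(scene_description)
--
--     # Add 4th of July theme elements if relevant
--     if any(word in story_theme.lower() for word in ['july', '4th', 'patriotic', 'independence']):
--         prompt_parts.append("with American flags and red, white, and blue decorations")
--
--     # Add other characters mentioned
--     if 'bella' in content_lower and 'rabbit' in content_lower:
--         prompt_parts.append("with a friendly white rabbit companion")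
--     if 'max' in content_lower and 'dog' in content_lower:
--         prompt_parts.append("with a wise golden retriever dog")
--
--     # Style specifications - emphasize NO TEXT
--     style_specs = [
--         "bright vibrant colors",
--         "warm sunny lighting",
--         "cartoon illustration style",
--         "whimsical and friendly",
--         "suitable for children ages 4-8",
--         "storybook art style",
--         "clean composition",
--         "cheerful atmosphere",
--         "NO TEXT OR WORDS visible in the image",
--         "no speech bubbles or letters"
--     ]
--
--     # Combine all parts
--     prompt = ", ".join(prompt_parts) + ", " + ", ".join(style_specs)
--
--     # Ensure it's not too long (FLUX has token limits)
--     if len(prompt) > 450: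
--         prompt = prompt[:447] + "..."
--
--     return prompt
-- ===== SOURCE B (Python) =====
-- _STYLE_SPECS = [
--     "bright vibrant colors",
--     "warm sunny lighting",
--     "cartoon illustration style",
--     "whimsical and friendly",
--     "suitable for children ages 4-8",
--     "storybook art style",
--     "clean composition",
--     "cheerful atmosphere",
--     "NO TEXT OR WORDS visible in the image",
--     "no speech bubbles or letters",
-- ]
--
-- # every keyword the scene/companion logic ever looks for in the chapter text
-- _CONTENT_WORDS = (
--     'whiskers', 'woke up', 'morning', 'window', 'stretched', 'yawned',
--     'neighborhood', 'decorations', 'flags', 'outside',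
--     'bella', 'rabbit', 'hopping', 'street',
--     'planning', 'backyard', 'basket',
--     'friends', 'gathering', 'max', 'dog',
--     'craft', 'making', 'hats',
--     'sparkler', 'parade', 'lighting', 'twinkling',
--     'fireworks', 'sky', 'night', 'burst',
--     'celebration', 'party', 'dancing', 'music',
--     'story', 'listening', 'tree', 'gathered',
--     'playing', 'tag', 'games', 'running',
-- )
-- _THEME_WORDS = ('july', '4th', 'patriotic', 'independence')
--
-- _SCENES = [
--     (('woke up', 'morning', 'window', 'stretched', 'yawned'),
--      "waking up in a cozy bedroom, stretching and looking out a sunny window"),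
--     (('neighborhood', 'decorations', 'flags', 'outside'),
--      "looking out window at a neighborhood decorated with colorful American flags and patriotic bunting"),
--     (('bella', 'rabbit', 'hopping', 'street'),
--      "meeting a friendly white rabbit on a sunny street with red, white and blue decorations"),
--     (('planning', 'backyard', 'basket', 'decorations'),
--      "in a sunny backyard with colorful balloons and picnic tables, planning a party"),
--     (('friends', 'gathering', 'max', 'dog'),
--      "gathered with animal friends including a wise old dog and playful rabbit in a backyard"),
--     (('craft', 'making', 'hats', 'flags'),
--      "doing arts and crafts, making patriotic hats and decorations with friends"),
--     (('sparkler', 'parade', 'lighting', 'twinkling'),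
--      "holding sparklers that create magical twinkling lights in the evening"),
--     (('fireworks', 'sky', 'night', 'burst'),
--      "watching colorful fireworks bursting in the dark night sky"),
--     (('celebration', 'party', 'dancing', 'music'),
--      "celebrating at a joyful outdoor party with music and dancing"),
--     (('story', 'listening', 'tree', 'gathered'),
--      "sitting in a circle with friends under a shady tree listening to stories"),
--     (('playing', 'tag', 'games', 'running'),
--      "playing tag and games with friends in a colorful backyard"),
-- ]
--
--
-- def _keywords_present(text, words):
--     """Single left-to-right scan of text: the set of words occurring in it."""
--     found = set()
--     for j in range(len(text)):
--         for w in words: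
--             if text.startswith(w, j):
--                 found.add(w)
--     return found
--
--
-- def _first_scene(hits):
--     for kws, desc in _SCENES:
--         if not hits.isdisjoint(kws):
--             return desc
--     return "in a cheerful outdoor setting with patriotic decorations"
--
--
-- def enhance_image_prompt(chapter_content: str, chapter_title: str, story_theme: str) -> str:
--     hits = _keywords_present(chapter_content.lower(), _CONTENT_WORDS)
--     theme_hits = _keywords_present(story_theme.lower(), _THEME_WORDS)
--
--     parts = (["Children's book illustration"]
--              + (["featuring orange tabby cat"] if 'whiskers' in hits else [])
--              + [_first_scene(hits)]
--              + (["with American flags and red, white, and blue decorations"] if theme_hits else [])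
--              + (["with a friendly white rabbit companion"] if {'bella', 'rabbit'} <= hits else [])
--              + (["with a wise golden retriever dog"] if {'max', 'dog'} <= hits else []))
--
--     prompt = ", ".join(parts + _STYLE_SPECS)
--     return prompt if len(prompt) <= 450 else prompt[:447] + "..."
-- ===== Notes on version B (the rewrite author's own statement) =====
-- stated objective: alternative
-- what changed: Instead of A's ~50 independent substring searches and an 11-branch if/elif cascade, B makes one left-to-right scan of the lowered text collecting the set of keywords that occur (prefix check at each position), then picks the scene and companion parts by pure set queries (isdisjoint/issubset/membership) over that hit set.
import Mathlib
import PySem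

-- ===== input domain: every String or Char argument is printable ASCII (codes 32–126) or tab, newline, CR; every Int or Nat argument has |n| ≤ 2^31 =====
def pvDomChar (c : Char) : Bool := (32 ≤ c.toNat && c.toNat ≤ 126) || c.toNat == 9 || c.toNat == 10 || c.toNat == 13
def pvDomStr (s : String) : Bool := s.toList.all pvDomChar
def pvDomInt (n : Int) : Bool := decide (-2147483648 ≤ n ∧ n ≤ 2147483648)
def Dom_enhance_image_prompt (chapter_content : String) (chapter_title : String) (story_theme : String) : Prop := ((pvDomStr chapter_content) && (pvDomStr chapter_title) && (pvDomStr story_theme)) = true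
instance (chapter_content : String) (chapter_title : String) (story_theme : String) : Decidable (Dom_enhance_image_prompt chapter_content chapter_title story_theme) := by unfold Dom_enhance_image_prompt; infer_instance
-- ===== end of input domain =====

-- B replaces A's repeated 'in'-substring tests and if/elif cascade by ONE left-to-right scan of the
-- text that collects the set of occurring keywords, the scene then chosen by set queries; objective: alternative.


-- ===== PORT A =====
-- literal transliteration of A's if/elif cascade
def enhance_image_prompt (chapter_content : String) (chapter_title : String) (story_theme : String) : String :=
  let content_lower := PySem.Str.lower chapter_content
  let prompt_parts : List String := ["Children's book illustration"]
  let main_character := "orange tabby cat"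
  let prompt_parts :=
    if PySem.Str.isIn "whiskers" content_lower then
      prompt_parts ++ ["featuring " ++ main_character]
    else prompt_parts
  let scene_description :=
    if ["woke up", "morning", "window", "stretched", "yawned"].any (fun w => PySem.Str.isIn w content_lower) then
      "waking up in a cozy bedroom, stretching and looking out a sunny window"
    else if ["neighborhood", "decorations", "flags", "outside"].any (fun w => PySem.Str.isIn w content_lower) then
      "looking out window at a neighborhood decorated with colorful American flags and patriotic bunting"
    else if ["bella", "rabbit", "hopping", "street"].any (fun w => PySem.Str.isIn w content_lower) then
      "meeting a friendly white rabbit on a sunny street with red, white and blue decorations"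
    else if ["planning", "backyard", "basket", "decorations"].any (fun w => PySem.Str.isIn w content_lower) then
      "in a sunny backyard with colorful balloons and picnic tables, planning a party"
    else if ["friends", "gathering", "max", "dog"].any (fun w => PySem.Str.isIn w content_lower) then
      "gathered with animal friends including a wise old dog and playful rabbit in a backyard"
    else if ["craft", "making", "hats", "flags"].any (fun w => PySem.Str.isIn w content_lower) then
      "doing arts and crafts, making patriotic hats and decorations with friends"
    else if ["sparkler", "parade", "lighting", "twinkling"].any (fun w => PySem.Str.isIn w content_lower) then
      "holding sparklers that create magical twinkling lights in the evening"
    else if ["fireworks", "sky", "night", "burst"].any (fun w => PySem.Str.isIn w content_lower) then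
      "watching colorful fireworks bursting in the dark night sky"
    else if ["celebration", "party", "dancing", "music"].any (fun w => PySem.Str.isIn w content_lower) then
      "celebrating at a joyful outdoor party with music and dancing"
    else if ["story", "listening", "tree", "gathered"].any (fun w => PySem.Str.isIn w content_lower) then
      "sitting in a circle with friends under a shady tree listening to stories"
    else if ["playing", "tag", "games", "running"].any (fun w => PySem.Str.isIn w content_lower) then
      "playing tag and games with friends in a colorful backyard"
    else
      "in a cheerful outdoor setting with patriotic decorations"
  -- 'if scene_description:' — Python truthiness of a string is nonemptiness
  let prompt_parts := if scene_description ≠ "" then prompt_parts ++ [scene_description] else prompt_parts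
  let prompt_parts :=
    if ["july", "4th", "patriotic", "independence"].any (fun w => PySem.Str.isIn w (PySem.Str.lower story_theme)) then
      prompt_parts ++ ["with American flags and red, white, and blue decorations"]
    else prompt_parts
  let prompt_parts :=
    if PySem.Str.isIn "bella" content_lower && PySem.Str.isIn "rabbit" content_lower then
      prompt_parts ++ ["with a friendly white rabbit companion"]
    else prompt_parts
  let prompt_parts :=
    if PySem.Str.isIn "max" content_lower && PySem.Str.isIn "dog" content_lower then
      prompt_parts ++ ["with a wise golden retriever dog"]
    else prompt_parts
  let style_specs : List String :=
    ["bright vibrant colors", "warm sunny lighting", "cartoon illustration style",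
     "whimsical and friendly", "suitable for children ages 4-8", "storybook art style",
     "clean composition", "cheerful atmosphere", "NO TEXT OR WORDS visible in the image",
     "no speech bubbles or letters"]
  let prompt := PySem.Str.join ", " prompt_parts ++ ", " ++ PySem.Str.join ", " style_specs
  if PySem.Str.len prompt > 450 then PySem.Str.slice prompt none (some 447) ++ "..." else prompt

-- ===== PORT B =====
def pvStyleSpecs : List String :=
  ["bright vibrant colors", "warm sunny lighting", "cartoon illustration style",
   "whimsical and friendly", "suitable for children ages 4-8", "storybook art style",
   "clean composition", "cheerful atmosphere", "NO TEXT OR WORDS visible in the image",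
   "no speech bubbles or letters"]

-- every keyword the scene/companion logic ever looks for in the chapter text
def pvContentWords : List (List Char) :=
  (["whiskers", "woke up", "morning", "window", "stretched", "yawned",
    "neighborhood", "decorations", "flags", "outside",
    "bella", "rabbit", "hopping", "street",
    "planning", "backyard", "basket",
    "friends", "gathering", "max", "dog",
    "craft", "making", "hats",
    "sparkler", "parade", "lighting", "twinkling",
    "fireworks", "sky", "night", "burst",
    "celebration", "party", "dancing", "music",
    "story", "listening", "tree", "gathered",
    "playing", "tag", "games", "running"] : List String).map String.toList

def pvThemeWords : List (List Char) :=
  (["july", "4th", "patriotic", "independence"] : List String).map String.toList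

def pvScenes : List (List String × String) :=
  [(["woke up", "morning", "window", "stretched", "yawned"],
    "waking up in a cozy bedroom, stretching and looking out a sunny window"),
   (["neighborhood", "decorations", "flags", "outside"],
    "looking out window at a neighborhood decorated with colorful American flags and patriotic bunting"),
   (["bella", "rabbit", "hopping", "street"],
    "meeting a friendly white rabbit on a sunny street with red, white and blue decorations"),
   (["planning", "backyard", "basket", "decorations"],
    "in a sunny backyard with colorful balloons and picnic tables, planning a party"),
   (["friends", "gathering", "max", "dog"],
    "gathered with animal friends including a wise old dog and playful rabbit in a backyard"),
   (["craft", "making", "hats", "flags"],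
    "doing arts and crafts, making patriotic hats and decorations with friends"),
   (["sparkler", "parade", "lighting", "twinkling"],
    "holding sparklers that create magical twinkling lights in the evening"),
   (["fireworks", "sky", "night", "burst"],
    "watching colorful fireworks bursting in the dark night sky"),
   (["celebration", "party", "dancing", "music"],
    "celebrating at a joyful outdoor party with music and dancing"),
   (["story", "listening", "tree", "gathered"],
    "sitting in a circle with friends under a shady tree listening to stories"),
   (["playing", "tag", "games", "running"],
    "playing tag and games with friends in a colorful backyard")]

-- Source B's _keywords_present: one scan over the text positions (range(len(text)) is List.range, exact),
-- text.startswith(w, j) for 0 ≤ j is exactly 'w is a prefix of text[j:]' = Chars.startswith (text.drop j) w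
def pvKeywordsPresent (text : List Char) (words : List (List Char)) : PySem.Set (List Char) :=
  (List.range text.length).foldl
    (fun found j =>
      words.foldl
        (fun found w =>
          if PySem.Chars.startswith (text.drop j) w then PySem.Set.add found w else found)
        found)
    PySem.Set.empty

-- Source B's _first_scene: for/break/else over the table, with hits.isdisjoint(kws)
def pvFirstScene (hits : PySem.Set (List Char)) : List (List String × String) → String
  | [] => "in a cheerful outdoor setting with patriotic decorations"
  | (kws, desc) :: rest =>
      if PySem.Set.isdisjoint hits (kws.map String.toList) then pvFirstScene hits rest else desc

def enhance_image_prompt_alt (chapter_content : String) (chapter_title : String) (story_theme : String) : String :=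
  let hits := pvKeywordsPresent (PySem.Str.lower chapter_content).toList pvContentWords
  let theme_hits := pvKeywordsPresent (PySem.Str.lower story_theme).toList pvThemeWords
  let parts : List String :=
    ["Children's book illustration"]
    ++ (if PySem.Set.contains hits "whiskers".toList then ["featuring orange tabby cat"] else [])
    ++ [pvFirstScene hits pvScenes]
    ++ (if !theme_hits.isEmpty then    -- 'if theme_hits:' — truthiness of a set is nonemptiness
          ["with American flags and red, white, and blue decorations"] else [])
    ++ (if PySem.Set.issubset (PySem.Set.ofList ["bella".toList, "rabbit".toList]) hits then
          ["with a friendly white rabbit companion"] else [])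
    ++ (if PySem.Set.issubset (PySem.Set.ofList ["max".toList, "dog".toList]) hits then
          ["with a wise golden retriever dog"] else [])
  let prompt := PySem.Str.join ", " (parts ++ pvStyleSpecs)
  if PySem.Str.len prompt ≤ 450 then prompt else PySem.Str.slice prompt none (some 447) ++ "..."

-- ===== PRECONDITION & SPEC =====
def Spec_enhance_image_prompt (chapter_content : String) (chapter_title : String) (story_theme : String) (out : String) : Prop := out = enhance_image_prompt_alt chapter_content chapter_title story_theme
instance (chapter_content : String) (chapter_title : String) (story_theme : String) (out : String) : Decidable (Spec_enhance_image_prompt chapter_content chapter_title story_theme out) := by unfold Spec_enhance_image_prompt; infer_instance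

-- ===== CLAIM (what is proved, stated in full; the proofs are below) =====
def Claim_equal_enhance_image_prompt : Prop := ∀ (chapter_content : String) (chapter_title : String) (story_theme : String), Dom_enhance_image_prompt chapter_content chapter_title story_theme → Spec_enhance_image_prompt chapter_content chapter_title story_theme (enhance_image_prompt chapter_content chapter_title story_theme)

-- ===== LEMMAS AND PROOFS =====
set_option maxRecDepth 8000

-- membership in the inner fold over the word list
theorem pv_mem_inner (p : List Char → Bool) (ws : List (List Char))
    (s : PySem.Set (List Char)) (w : List Char) :
    w ∈ ws.foldl (fun s v => if p v then PySem.Set.add s v else s) s ↔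
      w ∈ s ∨ (w ∈ ws ∧ p w = true) := by
  induction ws generalizing s with
  | nil => simp
  | cons v vs ih =>
    simp only [List.foldl_cons, ih]
    by_cases hv : p v = true
    · simp only [hv, if_true, PySem.Set.mem_add]
      constructor
      · rintro (⟨h | rfl⟩ | ⟨hm, hp⟩)
        · exact Or.inl h
        · exact Or.inr ⟨List.mem_cons_self, hv⟩
        · exact Or.inr ⟨List.mem_cons_of_mem _ hm, hp⟩
      · rintro (h | ⟨hm, hp⟩)
        · exact Or.inl (Or.inl h)
        · rcases List.mem_cons.1 hm with rfl | hm'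
          · exact Or.inl (Or.inr rfl)
          · exact Or.inr ⟨hm', hp⟩
    · simp only [hv]
      constructor
      · rintro (h | ⟨hm, hp⟩)
        · exact Or.inl h
        · exact Or.inr ⟨List.mem_cons_of_mem _ hm, hp⟩
      · rintro (h | ⟨hm, hp⟩)
        · exact Or.inl h
        · rcases List.mem_cons.1 hm with rfl | hm'
          · exact absurd hp hv
          · exact Or.inr ⟨hm', hp⟩

-- membership in the outer fold over the positions
theorem pv_mem_outer (P : Nat → List Char → Bool) (ws : List (List Char))
    (js : List Nat) (s : PySem.Set (List Char)) (w : List Char) :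
    w ∈ js.foldl (fun s j => ws.foldl (fun s v => if P j v then PySem.Set.add s v else s) s) s ↔
      w ∈ s ∨ (w ∈ ws ∧ ∃ j ∈ js, P j w = true) := by
  induction js generalizing s with
  | nil => simp
  | cons j js ih =>
    simp only [List.foldl_cons, ih, pv_mem_inner]
    constructor
    · rintro ((h | ⟨hm, hp⟩) | ⟨hm, k, hk, hp⟩)
      · exact Or.inl h
      · exact Or.inr ⟨hm, j, List.mem_cons_self, hp⟩
      · exact Or.inr ⟨hm, k, List.mem_cons_of_mem _ hk, hp⟩
    · rintro (h | ⟨hm, k, hk, hp⟩)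
      · exact Or.inl (Or.inl h)
      · rcases List.mem_cons.1 hk with rfl | hk'
        · exact Or.inl (Or.inr ⟨hm, hp⟩)
        · exact Or.inr ⟨hm, k, hk', hp⟩

theorem pv_mem_scan (text : List Char) (words : List (List Char)) (w : List Char) (hw : w ≠ []) :
    w ∈ pvKeywordsPresent text words ↔ w ∈ words ∧ PySem.Chars.isIn w text = true := by
  unfold pvKeywordsPresent
  rw [pv_mem_outer]
  simp only [PySem.Set.empty, List.not_mem_nil, false_or]
  constructor
  · rintro ⟨hm, j, _, hp⟩
    refine ⟨hm, ?_⟩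
    exact (PySem.Chars.exists_prefix_drop_iff_isIn w text).1 ⟨j, (PySem.Chars.startswith_iff _ _).1 hp⟩
  · rintro ⟨hm, hin⟩
    obtain ⟨j, hj⟩ := (PySem.Chars.exists_prefix_drop_iff_isIn w text).2 hin
    refine ⟨hm, j, ?_, (PySem.Chars.startswith_iff _ _).2 hj⟩
    rw [List.mem_range]
    by_contra hlt
    have : text.drop j = [] := List.drop_eq_nil_of_le (by omega)
    rw [this] at hj
    exact hw (List.prefix_nil.1 hj)

-- the hit set of the lowered content, as used by B
theorem pv_contains_scan (text : List Char) (words : List (List Char)) (w : List Char)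
    (hm : w ∈ words) (hw : w ≠ []) :
    PySem.Set.contains (pvKeywordsPresent text words) w = PySem.Chars.isIn w text := by
  by_cases h : PySem.Chars.isIn w text = true
  · rw [h, PySem.Set.contains]
    exact List.elem_eq_true_of_mem ((pv_mem_scan text words w hw).2 ⟨hm, h⟩)
  · rw [Bool.not_eq_true] at h
    rw [h, PySem.Set.contains]
    rw [Bool.eq_false_iff]
    intro hmem
    exact absurd ((pv_mem_scan text words w hw).1 (by simpa [List.elem_iff] using hmem)).2 (by simp [h])

-- forward direction of the scan characterisation (no nonemptiness needed)
theorem pv_scan_sub (text : List Char) (words : List (List Char)) (w : List Char)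
    (h : w ∈ pvKeywordsPresent text words) :
    w ∈ words ∧ PySem.Chars.isIn w text = true := by
  unfold pvKeywordsPresent at h
  rw [pv_mem_outer] at h
  simp only [PySem.Set.empty, List.not_mem_nil, false_or] at h
  obtain ⟨hm, j, _, hp⟩ := h
  exact ⟨hm, (PySem.Chars.exists_prefix_drop_iff_isIn w text).1
    ⟨j, (PySem.Chars.startswith_iff _ _).1 hp⟩⟩

-- B's row test equals (the negation of) A's any-test, for keywords drawn from pvContentWords
theorem pv_disjoint_scan (text : List Char) (kws : List String)
    (h : ∀ w ∈ kws, w.toList ∈ pvContentWords ∧ w.toList ≠ []) :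
    PySem.Set.isdisjoint (pvKeywordsPresent text pvContentWords) (kws.map String.toList) =
      !(kws.any fun w => PySem.Chars.isIn w.toList text) := by
  by_cases hb : (kws.any fun w => PySem.Chars.isIn w.toList text) = true
  · rw [hb, Bool.not_true, Bool.eq_false_iff]
    intro hd
    obtain ⟨w, hw, hin⟩ := List.any_eq_true.1 hb
    have hmem : w.toList ∈ pvKeywordsPresent text pvContentWords :=
      (pv_mem_scan text pvContentWords w.toList (h w hw).2).2 ⟨(h w hw).1, hin⟩
    exact (PySem.Set.isdisjoint_iff _ _).1 hd _ hmem (List.mem_map_of_mem hw)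
  · rw [Bool.not_eq_true] at hb
    rw [hb, Bool.not_false]
    rw [PySem.Set.isdisjoint_iff]
    rintro x hx hmap
    obtain ⟨w, hw, rfl⟩ := List.mem_map.1 hmap
    have := (pv_scan_sub text pvContentWords _ hx).2
    have : (kws.any fun w => PySem.Chars.isIn w.toList text) = true :=
      List.any_eq_true.2 ⟨w, hw, this⟩
    simp [hb] at this

-- the prompt-parts list, abstracted over the five conditions and the scene
def pvPartsGen (bw : Bool) (scene : String) (bth bbr bmd : Bool) : List String :=
  ["Children's book illustration"]
  ++ (if bw then ["featuring orange tabby cat"] else [])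
  ++ [scene]
  ++ (if bth then ["with American flags and red, white, and blue decorations"] else [])
  ++ (if bbr then ["with a friendly white rabbit companion"] else [])
  ++ (if bmd then ["with a wise golden retriever dog"] else [])

-- A's append chain equals the abstracted parts list (the scene is never empty)
theorem pv_chain_eq (bw : Bool) (scene : String) (bth bbr bmd : Bool) (hs : scene ≠ "") :
    (let p : List String := ["Children's book illustration"];
     let p := if bw then p ++ ["featuring " ++ "orange tabby cat"] else p;
     let p := if scene ≠ "" then p ++ [scene] else p;
     let p := if bth then p ++ ["with American flags and red, white, and blue decorations"] else p;
     let p := if bbr then p ++ ["with a friendly white rabbit companion"] else p;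
     if bmd then p ++ ["with a wise golden retriever dog"] else p)
    = pvPartsGen bw scene bth bbr bmd := by
  have hf : ("featuring " ++ "orange tabby cat" : String) = "featuring orange tabby cat" := rfl
  simp only [hf, ne_eq, hs, not_false_eq_true, ite_true, pvPartsGen]
  split_ifs <;> simp

def pvFinishA (parts : List String) : String :=
  let prompt := PySem.Str.join ", " parts ++ ", " ++ PySem.Str.join ", " pvStyleSpecs
  if PySem.Str.len prompt > 450 then PySem.Str.slice prompt none (some 447) ++ "..." else prompt

def pvFinishB (parts : List String) : String :=
  let prompt := PySem.Str.join ", " (parts ++ pvStyleSpecs)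
  if PySem.Str.len prompt ≤ 450 then prompt else PySem.Str.slice prompt none (some 447) ++ "..."

theorem pv_chars_join_append (sep : List Char) (xs ys : List (List Char))
    (hx : xs ≠ []) (hy : ys ≠ []) :
    PySem.Chars.join sep (xs ++ ys) =
      PySem.Chars.join sep xs ++ sep ++ PySem.Chars.join sep ys := by
  induction xs with
  | nil => exact absurd rfl hx
  | cons a as ih =>
    cases as with
    | nil =>
      cases ys with
      | nil => exact absurd rfl hy
      | cons b bs =>
        simp [PySem.Chars.join_singleton, PySem.Chars.join_cons_cons, List.append_assoc]
    | cons a2 as2 =>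
      simp only [List.cons_append, PySem.Chars.join_cons_cons]
      rw [← List.cons_append, ih (by simp)]
      simp [List.append_assoc]

theorem pv_str_join_append (sep : String) (xs ys : List String)
    (hx : xs ≠ []) (hy : ys ≠ []) :
    PySem.Str.join sep (xs ++ ys) =
      PySem.Str.join sep xs ++ sep ++ PySem.Str.join sep ys := by
  have h := pv_chars_join_append sep.toList (xs.map String.toList) (ys.map String.toList)
    (by simpa using hx) (by simpa using hy)
  apply String.ext
  simpa [PySem.Str.join, String.toList_append] using h

theorem pv_if_swap (p : String) :
    (if PySem.Str.len p > 450 then PySem.Str.slice p none (some 447) ++ "..." else p) =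
      (if PySem.Str.len p ≤ 450 then p else PySem.Str.slice p none (some 447) ++ "...") := by
  split_ifs with h1 h2 <;> first | rfl | omega

theorem pv_finish_eq (parts : List String) (hp : parts ≠ []) :
    pvFinishA parts = pvFinishB parts := by
  unfold pvFinishA pvFinishB
  rw [pv_str_join_append ", " parts pvStyleSpecs hp (by unfold pvStyleSpecs; simp)]
  exact pv_if_swap _

-- A's scene cascade, as a named helper (defeq to the cascade in the port of A)
def pvSceneA (cl : String) : String :=
  if ["woke up", "morning", "window", "stretched", "yawned"].any (fun w => PySem.Str.isIn w cl) then
    "waking up in a cozy bedroom, stretching and looking out a sunny window"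
  else if ["neighborhood", "decorations", "flags", "outside"].any (fun w => PySem.Str.isIn w cl) then
    "looking out window at a neighborhood decorated with colorful American flags and patriotic bunting"
  else if ["bella", "rabbit", "hopping", "street"].any (fun w => PySem.Str.isIn w cl) then
    "meeting a friendly white rabbit on a sunny street with red, white and blue decorations"
  else if ["planning", "backyard", "basket", "decorations"].any (fun w => PySem.Str.isIn w cl) then
    "in a sunny backyard with colorful balloons and picnic tables, planning a party"
  else if ["friends", "gathering", "max", "dog"].any (fun w => PySem.Str.isIn w cl) then
    "gathered with animal friends including a wise old dog and playful rabbit in a backyard"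
  else if ["craft", "making", "hats", "flags"].any (fun w => PySem.Str.isIn w cl) then
    "doing arts and crafts, making patriotic hats and decorations with friends"
  else if ["sparkler", "parade", "lighting", "twinkling"].any (fun w => PySem.Str.isIn w cl) then
    "holding sparklers that create magical twinkling lights in the evening"
  else if ["fireworks", "sky", "night", "burst"].any (fun w => PySem.Str.isIn w cl) then
    "watching colorful fireworks bursting in the dark night sky"
  else if ["celebration", "party", "dancing", "music"].any (fun w => PySem.Str.isIn w cl) then
    "celebrating at a joyful outdoor party with music and dancing"
  else if ["story", "listening", "tree", "gathered"].any (fun w => PySem.Str.isIn w cl) then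
    "sitting in a circle with friends under a shady tree listening to stories"
  else if ["playing", "tag", "games", "running"].any (fun w => PySem.Str.isIn w cl) then
    "playing tag and games with friends in a colorful backyard"
  else
    "in a cheerful outdoor setting with patriotic decorations"

set_option maxHeartbeats 1000000 in
theorem pv_sceneA_ne (cl : String) : pvSceneA cl ≠ "" := by
  unfold pvSceneA
  split_ifs <;> simp

theorem pv_if_not {α : Type} (a : Bool) (x y : α) :
    (if (!a) = true then x else y) = if a = true then y else x := by
  cases a <;> rfl

-- B's first-scene scan over the table equals A's cascade
set_option maxHeartbeats 2000000 in
theorem pv_scene_eq (cl : String) :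
    pvFirstScene (pvKeywordsPresent cl.toList pvContentWords) pvScenes = pvSceneA cl := by
  have d := fun kws h => pv_disjoint_scan cl.toList kws h
  simp only [pvScenes, pvFirstScene]
  rw [d ["woke up", "morning", "window", "stretched", "yawned"] (by decide),
      d ["neighborhood", "decorations", "flags", "outside"] (by decide),
      d ["bella", "rabbit", "hopping", "street"] (by decide),
      d ["planning", "backyard", "basket", "decorations"] (by decide),
      d ["friends", "gathering", "max", "dog"] (by decide),
      d ["craft", "making", "hats", "flags"] (by decide),
      d ["sparkler", "parade", "lighting", "twinkling"] (by decide),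
      d ["fireworks", "sky", "night", "burst"] (by decide),
      d ["celebration", "party", "dancing", "music"] (by decide),
      d ["story", "listening", "tree", "gathered"] (by decide),
      d ["playing", "tag", "games", "running"] (by decide)]
  unfold pvSceneA
  simp only [pv_if_not, PySem.Str.isIn_eq]
  rfl

-- B's emptiness test on the theme hit set equals A's any-test on the theme words
theorem pv_theme_eq (t : String) :
    (!(pvKeywordsPresent t.toList pvThemeWords).isEmpty) =
      (["july", "4th", "patriotic", "independence"].any fun w => PySem.Chars.isIn w.toList t.toList) := by
  by_cases hb : (["july", "4th", "patriotic", "independence"].any fun w => PySem.Chars.isIn w.toList t.toList) = true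
  · rw [hb]
    obtain ⟨w, hw, hin⟩ := List.any_eq_true.1 hb
    have hm : String.toList w ∈ pvThemeWords := List.mem_map_of_mem hw
    have hne : String.toList w ≠ [] := by
      fin_cases hw <;> decide
    have : w.toList ∈ pvKeywordsPresent t.toList pvThemeWords :=
      (pv_mem_scan t.toList pvThemeWords w.toList hne).2 ⟨hm, hin⟩
    rcases hx : pvKeywordsPresent t.toList pvThemeWords with _ | ⟨y, ys⟩
    · rw [hx] at this; exact absurd this (List.not_mem_nil)
    · rfl
  · rw [Bool.not_eq_true] at hb
    rw [hb, Bool.not_eq_false', List.isEmpty_iff]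
    rw [List.eq_nil_iff_forall_not_mem]
    intro x hx
    obtain ⟨hm, hin⟩ := pv_scan_sub t.toList pvThemeWords x hx
    obtain ⟨w, hw, rfl⟩ := List.mem_map.1 hm
    have : (["july", "4th", "patriotic", "independence"].any fun w => PySem.Chars.isIn w.toList t.toList) = true :=
      List.any_eq_true.2 ⟨w, hw, hin⟩
    simp [hb] at this

-- B's two-element-subset test equals A's conjunction of membership tests
theorem pv_pair_eq (cl : String) (w1 w2 : String)
    (h1 : w1.toList ∈ pvContentWords) (hn1 : w1.toList ≠ [])
    (h2 : w2.toList ∈ pvContentWords) (hn2 : w2.toList ≠ []) :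
    PySem.Set.issubset (PySem.Set.ofList [w1.toList, w2.toList])
        (pvKeywordsPresent cl.toList pvContentWords) =
      (PySem.Chars.isIn w1.toList cl.toList && PySem.Chars.isIn w2.toList cl.toList) := by
  by_cases hb : (PySem.Chars.isIn w1.toList cl.toList && PySem.Chars.isIn w2.toList cl.toList) = true
  · rw [hb]
    rw [Bool.and_eq_true] at hb
    obtain ⟨hb1, hb2⟩ := hb
    rw [PySem.Set.issubset_iff]
    intro x hx
    rw [PySem.Set.mem_ofList] at hx
    simp only [List.mem_cons, List.not_mem_nil, or_false] at hx
    rcases hx with rfl | rfl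
    · exact (pv_mem_scan cl.toList pvContentWords _ hn1).2 ⟨h1, hb1⟩
    · exact (pv_mem_scan cl.toList pvContentWords _ hn2).2 ⟨h2, hb2⟩
  · rw [Bool.not_eq_true] at hb
    rw [hb, Bool.eq_false_iff]
    intro hs
    have hall := (PySem.Set.issubset_iff _ _).1 hs
    have m1 := hall w1.toList (by rw [PySem.Set.mem_ofList]; simp)
    have m2 := hall w2.toList (by rw [PySem.Set.mem_ofList]; simp)
    have i1 := ((pv_mem_scan cl.toList pvContentWords _ hn1).1 m1).2
    have i2 := ((pv_mem_scan cl.toList pvContentWords _ hn2).1 m2).2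
    simp [i1, i2] at hb

-- B's whiskers membership test equals A's substring test
theorem pv_whiskers_eq (cl : String) :
    PySem.Set.contains (pvKeywordsPresent cl.toList pvContentWords) "whiskers".toList =
      PySem.Chars.isIn "whiskers".toList cl.toList :=
  pv_contains_scan cl.toList pvContentWords "whiskers".toList (by decide) (by decide)

theorem pv_partsGen_ne (bw : Bool) (scene : String) (bth bbr bmd : Bool) :
    pvPartsGen bw scene bth bbr bmd ≠ [] := by
  unfold pvPartsGen; simp

-- ===== VERDICT (by name: the statement is the Claim_ definition above) =====
set_option maxHeartbeats 2000000 in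
theorem enhance_image_prompt_spec : Claim_equal_enhance_image_prompt := by
  intro c t s _
  unfold Spec_enhance_image_prompt
  have hA : enhance_image_prompt c t s =
      pvFinishA (pvPartsGen (PySem.Str.isIn "whiskers" (PySem.Str.lower c))
        (pvSceneA (PySem.Str.lower c))
        (["july", "4th", "patriotic", "independence"].any
          (fun w => PySem.Str.isIn w (PySem.Str.lower s)))
        (PySem.Str.isIn "bella" (PySem.Str.lower c) && PySem.Str.isIn "rabbit" (PySem.Str.lower c))
        (PySem.Str.isIn "max" (PySem.Str.lower c) && PySem.Str.isIn "dog" (PySem.Str.lower c))) :=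
    Eq.trans rfl (congrArg pvFinishA
      (pv_chain_eq (PySem.Str.isIn "whiskers" (PySem.Str.lower c))
        (pvSceneA (PySem.Str.lower c))
        (["july", "4th", "patriotic", "independence"].any
          (fun w => PySem.Str.isIn w (PySem.Str.lower s)))
        (PySem.Str.isIn "bella" (PySem.Str.lower c) && PySem.Str.isIn "rabbit" (PySem.Str.lower c))
        (PySem.Str.isIn "max" (PySem.Str.lower c) && PySem.Str.isIn "dog" (PySem.Str.lower c))
        (pv_sceneA_ne (PySem.Str.lower c))))
  have hB : enhance_image_prompt_alt c t s =
      pvFinishB (pvPartsGen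
        (PySem.Set.contains (pvKeywordsPresent (PySem.Str.lower c).toList pvContentWords) "whiskers".toList)
        (pvFirstScene (pvKeywordsPresent (PySem.Str.lower c).toList pvContentWords) pvScenes)
        (!(pvKeywordsPresent (PySem.Str.lower s).toList pvThemeWords).isEmpty)
        (PySem.Set.issubset (PySem.Set.ofList ["bella".toList, "rabbit".toList])
          (pvKeywordsPresent (PySem.Str.lower c).toList pvContentWords))
        (PySem.Set.issubset (PySem.Set.ofList ["max".toList, "dog".toList])
          (pvKeywordsPresent (PySem.Str.lower c).toList pvContentWords))) := rfl
  rw [hA, hB, pv_whiskers_eq, pv_scene_eq, pv_theme_eq,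
      pv_pair_eq (PySem.Str.lower c) "bella" "rabbit" (by decide) (by decide) (by decide) (by decide),
      pv_pair_eq (PySem.Str.lower c) "max" "dog" (by decide) (by decide) (by decide) (by decide)]
  rw [pv_finish_eq _ (pv_partsGen_ne _ _ _ _ _)]
  simp only [PySem.Str.isIn_eq]
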